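-- pv_equiv track=rewrite | github.com/ReefKenig/ColmanPython | Assignment 1/parser.py | preprocess_tokens
-- ===== SOURCE A (Python) =====
-- OPERATOR_PRECEDENCE = {'+': 1, '-': 1, '*': 2, '/': 2}
--
-- def preprocess_tokens(tokens):
--     result = []
--     i = 0
--     while i < len(tokens):
--         token = tokens[i]
--
--         if token == '-' and (i == 0 or tokens[i - 1] in OPERATOR_PRECEDENCE or tokens[i - 1] == '('):
--             if i + 1 < len(tokens) and tokens[i + 1].isdigit():
--                 result.append('-' + tokens[i + 1])
--                 i += 2
--                 continue
--         result.append(token)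
--         i += 1
--     return result
-- ===== SOURCE B (Python) =====
-- OPERATOR_PRECEDENCE = {'+': 1, '-': 1, '*': 2, '/': 2}
--
-- def preprocess_tokens(tokens):
--     result = []
--     prev = None
--     pending = False
--     for tok in tokens:
--         if pending:
--             pending = False
--             if tok.isdigit():
--                 result.append('-' + tok)
--                 prev = tok
--                 continue
--             result.append('-')
--         if tok == '-' and (prev is None or prev in OPERATOR_PRECEDENCE or prev == '('):
--             pending = True
--         else:
--             result.append(tok)
--         prev = tok
--     if pending:
--         result.append('-')
--     return result
-- ===== Notes on version B (the rewrite author's own statement) =====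
-- stated objective: alternative
-- what changed: Replaced the index-based while loop with lookahead (tokens[i+1]) and index jumps (i += 2) by a forward single-pass state machine over the tokens themselves, carrying the previous original token and a pending-minus flag, with a trailing flush after the loop.
import Mathlib
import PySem

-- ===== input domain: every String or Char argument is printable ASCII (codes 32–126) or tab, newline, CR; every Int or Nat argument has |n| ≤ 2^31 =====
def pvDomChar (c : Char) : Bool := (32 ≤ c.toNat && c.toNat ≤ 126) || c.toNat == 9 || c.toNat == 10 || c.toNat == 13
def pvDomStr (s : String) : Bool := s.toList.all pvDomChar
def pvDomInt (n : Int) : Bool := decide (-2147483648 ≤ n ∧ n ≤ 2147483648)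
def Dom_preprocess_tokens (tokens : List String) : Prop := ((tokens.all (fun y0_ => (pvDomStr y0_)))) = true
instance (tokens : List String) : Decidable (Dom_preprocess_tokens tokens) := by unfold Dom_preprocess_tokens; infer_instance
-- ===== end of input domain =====

-- B replaces A's index-based while loop with lookahead and index jumps by a forward
-- single-pass state machine (previous original token + pending-minus flag); same behaviour, same cost.

-- ===== PORT A =====
def pvOps : PySem.Dict String Int :=
  PySem.Dict.ofList [("+", 1), ("-", 1), ("*", 2), ("/", 2)]

def preprocess_tokens_go (tokens : List String) (i : Nat) (result : List String) : List String :=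
  if _h : i < tokens.length then
    let token := tokens[i]?.getD ""
    if token == "-" &&
        (decide (i = 0) || pvOps.contains (tokens[i-1]?.getD "") || tokens[i-1]?.getD "" == "(") then
      if decide (i + 1 < tokens.length) && PySem.Str.strIsdigit (tokens[i+1]?.getD "") then
        preprocess_tokens_go tokens (i + 2) (result ++ ["-" ++ tokens[i+1]?.getD ""])
      else
        preprocess_tokens_go tokens (i + 1) (result ++ [token])
    else
      preprocess_tokens_go tokens (i + 1) (result ++ [token])
  else
    result
termination_by tokens.length - i

def preprocess_tokens (tokens : List String) : List String :=
  preprocess_tokens_go tokens 0 []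

-- ===== PORT B =====
def pvIsUnary (prev : Option String) : Bool :=
  match prev with
  | none => true
  | some p => pvOps.contains p || p == "("

-- one step of the state machine: state = (result, prev original token, pending minus)
def pvBStep (st : List String × Option String × Bool) (tok : String) :
    List String × Option String × Bool :=
  if st.2.2 && PySem.Str.strIsdigit tok then
    (st.1 ++ ["-" ++ tok], some tok, false)
  else
    let result := if st.2.2 then st.1 ++ ["-"] else st.1
    if tok == "-" && pvIsUnary st.2.1 then
      (result, some tok, true)
    else
      (result ++ [tok], some tok, false)

def preprocess_tokens_alt (tokens : List String) : List String :=
  let st := tokens.foldl pvBStep ([], none, false)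
  if st.2.2 then st.1 ++ ["-"] else st.1

-- ===== PRECONDITION & SPEC =====
def Spec_preprocess_tokens (tokens : List String) (out : List String) : Prop := out = preprocess_tokens_alt tokens
instance (tokens : List String) (out : List String) : Decidable (Spec_preprocess_tokens tokens out) := by unfold Spec_preprocess_tokens; infer_instance

-- ===== CLAIM (what is proved, stated in full; the proofs are below) =====
def Claim_equal_preprocess_tokens : Prop := ∀ (tokens : List String), Dom_preprocess_tokens tokens → Spec_preprocess_tokens tokens (preprocess_tokens tokens)

-- ===== LEMMAS AND PROOFS =====

-- the previous ORIGINAL token, as B's state tracks it, at index i of A's loop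
def pvPrev (tokens : List String) (i : Nat) : Option String :=
  if i = 0 then none else some (tokens[i-1]?.getD "")

def pvFinish (st : List String × Option String × Bool) : List String :=
  if st.2.2 then st.1 ++ ["-"] else st.1

theorem pvIsUnary_prev (tokens : List String) (i : Nat) :
    pvIsUnary (pvPrev tokens i) =
      (decide (i = 0) || pvOps.contains (tokens[i-1]?.getD "") || tokens[i-1]?.getD "" == "(") := by
  by_cases h : i = 0 <;> simp [pvPrev, pvIsUnary, h]

theorem pvDrop_cons {tokens : List String} {i : Nat} (h : i < tokens.length) :
    tokens.drop i = tokens[i]?.getD "" :: tokens.drop (i + 1) := by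
  rw [List.getElem?_eq_getElem h, Option.getD_some]
  exact (List.getElem_cons_drop h).symm

theorem go_eq (tokens : List String) :
    ∀ n i result, tokens.length - i ≤ n →
      preprocess_tokens_go tokens i result =
        pvFinish ((tokens.drop i).foldl pvBStep (result, pvPrev tokens i, false)) := by
  intro n
  induction n with
  | zero =>
    intro i result hn
    have h : ¬ i < tokens.length := by omega
    rw [preprocess_tokens_go, dif_neg h, List.drop_eq_nil_of_le (by omega)]
    simp [pvFinish]
  | succ n ih =>
    intro i result hn
    by_cases h : i < tokens.length
    · rw [preprocess_tokens_go, dif_pos h, pvDrop_cons h]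
      set tok := tokens[i]?.getD "" with htok
      by_cases hc1 : (tok == "-" &&
          (decide (i = 0) || pvOps.contains (tokens[i-1]?.getD "") || tokens[i-1]?.getD "" == "(")) = true
      · -- unary-minus position
        have htokm : tok = "-" := by
          have := (Bool.and_eq_true _ _).mp hc1
          exact eq_of_beq this.1
        have hun : (tok == "-" && pvIsUnary (pvPrev tokens i)) = true := by
          rw [pvIsUnary_prev]; exact hc1
        simp only [if_pos hc1]
        have hstep1 : pvBStep (result, pvPrev tokens i, false) tok = (result, some tok, true) := by
          simp [pvBStep, hun]
        by_cases hc2 : (decide (i + 1 < tokens.length) &&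
            PySem.Str.strIsdigit (tokens[i+1]?.getD "")) = true
        · -- merge: next token is a digit string
          have hlt : i + 1 < tokens.length := by
            have := (Bool.and_eq_true _ _).mp hc2
            exact of_decide_eq_true this.1
          have hdig : PySem.Str.strIsdigit (tokens[i+1]?.getD "") = true :=
            ((Bool.and_eq_true _ _).mp hc2).2
          rw [if_pos hc2, List.foldl_cons, hstep1, pvDrop_cons hlt, List.foldl_cons]
          have hdig' : PySem.Chars.strIsdigit (tokens[i+1]?.getD "").toList = true := by
            simpa using hdig
          have hstep2 : pvBStep (result, some tok, true) (tokens[i+1]?.getD "") =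
              (result ++ ["-" ++ tokens[i+1]?.getD ""], some (tokens[i+1]?.getD ""), false) := by
            simp [pvBStep, hdig']
          rw [hstep2]
          have hprev : pvPrev tokens (i + 2) = some (tokens[i+1]?.getD "") := by
            simp [pvPrev]
          rw [ih (i + 2) (result ++ ["-" ++ tokens[i+1]?.getD ""]) (by omega), hprev]
        · -- deferred minus: flush '-' and continue
          rw [if_neg hc2, List.foldl_cons, hstep1]
          have hprev : pvPrev tokens (i + 1) = some "-" := by
            simp only [pvPrev, if_neg (by omega : ¬ i + 1 = 0), Nat.add_sub_cancel]
            rw [← htok, htokm]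
          rw [ih (i + 1) (result ++ [tok]) (by omega), hprev, htokm]
          by_cases hlt : i + 1 < tokens.length
          · rw [pvDrop_cons hlt, List.foldl_cons, List.foldl_cons]
            have hdig' : PySem.Chars.strIsdigit (tokens[i+1]?.getD "").toList = false := by
              simpa [hlt] using hc2
            have : pvBStep (result, some "-", true) (tokens[i+1]?.getD "") =
                pvBStep (result ++ ["-"], some "-", false) (tokens[i+1]?.getD "") := by
              simp [pvBStep, hdig']
            rw [this]
          · have hnil : tokens.drop (i + 1) = [] := List.drop_eq_nil_of_le (by omega)
            rw [hnil]
            simp [pvFinish]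
      · -- ordinary token
        simp only [if_neg hc1]
        rw [List.foldl_cons]
        have hun : (tok == "-" && pvIsUnary (pvPrev tokens i)) = false := by
          rw [pvIsUnary_prev]; exact Bool.eq_false_iff.mpr hc1
        have hstep : pvBStep (result, pvPrev tokens i, false) tok =
            (result ++ [tok], some tok, false) := by
          simp [pvBStep, hun]
        rw [hstep, ih (i + 1) (result ++ [tok]) (by omega)]
        have hprev : pvPrev tokens (i + 1) = some tok := by
          simp [pvPrev, htok]
        rw [hprev]
    · rw [preprocess_tokens_go, dif_neg h, List.drop_eq_nil_of_le (by omega)]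
      simp [pvFinish]

-- ===== VERDICT (by name: the statement is the Claim_ definition above) =====
theorem preprocess_tokens_spec : Claim_equal_preprocess_tokens := by
  intro tokens _
  unfold Spec_preprocess_tokens preprocess_tokens preprocess_tokens_alt
  rw [go_eq tokens tokens.length 0 [] (by omega)]
  simp [pvPrev, pvFinish]
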